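-- pv_equiv track=rewrite | github.com/rishikesha/ProgrammingProblems | Kattis/freeweights.py | check
-- ===== SOURCE A (Python) =====
-- def check(sh1, lim):
--     """
--     Check if lim is an upper bound for the weight
--     you have to lift in sh1. One does not have to lift
--     heavier weight if any pair  of heavier weights
--     is separated by weights less than or equal to lim
--     """
--     firstOverLim = None
--     for s in sh1:
--         if s > lim:
--             if firstOverLim is None:
--                 firstOverLim = s
--             elif firstOverLim == s:
--                 firstOverLim = None
--             else:
--                 return False
--     return True
-- ===== SOURCE B (Python) =====
-- def check(sh1, lim):
--     over = [s for s in sh1 if s > lim]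
--     for i in range(0, len(over) - 1, 2):
--         if over[i] != over[i + 1]:
--             return False
--     return True
-- ===== Notes on version B (the rewrite author's own statement) =====
-- stated objective: simpler
-- what changed: Replaces the single pass with a toggling Optional state variable by two passes: first materialize the over-limit weights, then compare consecutive pairs by index-stepped loop (odd final element implicitly accepted).
import Mathlib
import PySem

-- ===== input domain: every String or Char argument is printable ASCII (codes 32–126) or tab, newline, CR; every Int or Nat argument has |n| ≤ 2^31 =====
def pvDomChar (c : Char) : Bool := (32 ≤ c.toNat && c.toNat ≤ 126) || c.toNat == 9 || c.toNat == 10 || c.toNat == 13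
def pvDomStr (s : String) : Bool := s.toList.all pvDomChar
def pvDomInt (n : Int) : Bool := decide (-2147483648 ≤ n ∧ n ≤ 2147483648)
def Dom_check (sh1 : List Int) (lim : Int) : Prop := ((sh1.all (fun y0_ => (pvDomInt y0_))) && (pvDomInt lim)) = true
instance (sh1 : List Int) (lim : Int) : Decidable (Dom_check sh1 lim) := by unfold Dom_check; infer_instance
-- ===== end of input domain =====

-- B replaces A's one-pass toggling 'firstOverLim' state machine by a filter pass plus an
-- index-stepped pairwise comparison ov the ov-limit weights (objective: simpler).

-- ===== PORT A =====
-- the for-loop ov sh1 with its 'firstOverLim' state and early 'return False'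
def checkGo (lim : Int) (first : Option Int) : List Int → Bool
  | [] => true
  | s :: rest =>
    if lim < s then
      match first with
      | none => checkGo lim (some s) rest
      | some f => if f = s then checkGo lim none rest else false
    else checkGo lim first rest

def check (sh1 : List Int) (lim : Int) : Bool := checkGo lim none sh1

-- ===== PORT B =====
def check_alt (sh1 : List Int) (lim : Int) : Bool :=
  let ov := sh1.filter (fun s => decide (lim < s))
  (PySem.List.pyRange 0 ((ov.length : Int) - 1) 2).all
    (fun i => PySem.List.pyGetD ov i 0 == PySem.List.pyGetD ov (i + 1) 0)

-- ===== PRECONDITION & SPEC =====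
def Spec_check (sh1 : List Int) (lim : Int) (out : Bool) : Prop := out = check_alt sh1 lim
instance (sh1 : List Int) (lim : Int) (out : Bool) : Decidable (Spec_check sh1 lim out) := by unfold Spec_check; infer_instance

-- ===== CLAIM (what is proved, stated in full; the proofs are below) =====
def Claim_equal_check : Prop := ∀ (sh1 : List Int) (lim : Int), Dom_check sh1 lim → Spec_check sh1 lim (check sh1 lim)

-- ===== LEMMAS AND PROOFS =====

-- common characterisation: consecutive pairs of a list are equal (odd tail accepted)
def pvPairs : List Int → Bool
  | a :: b :: rest => if a = b then pvPairs rest else false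
  | _ => true

theorem checkGo_eq_pvPairs (lim : Int) :
    ∀ (l : List Int) (first : Option Int),
      checkGo lim first l = pvPairs (first.toList ++ l.filter (fun s => decide (lim < s))) := by
  intro l
  induction l with
  | nil => intro first; cases first <;> simp [checkGo, pvPairs]
  | cons s rest ih =>
    intro first
    by_cases hs : lim < s
    · cases first with
      | none => simp [checkGo, hs, ih (some s)]
      | some f =>
        by_cases hf : f = s
        · simp [checkGo, hs, hf, ih none, pvPairs]
        · simp [checkGo, hs, hf, pvPairs]
    · cases first <;> simp [checkGo, hs, ih]

theorem range_all_shift (a b : Int) (rest : List Int) :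
    ((List.range ((a :: b :: rest).length / 2)).all
        (fun k => (a :: b :: rest).getD (2 * k) 0 == (a :: b :: rest).getD (2 * k + 1) 0))
      = ((a == b) &&
         (List.range (rest.length / 2)).all
            (fun k => rest.getD (2 * k) 0 == rest.getD (2 * k + 1) 0)) := by
  have hlen : (a :: b :: rest).length / 2 = rest.length / 2 + 1 := by
    simp [List.length_cons]; omega
  rw [hlen, List.range_succ_eq_map]
  simp only [List.all_cons, List.all_map, Function.comp_def, Nat.succ_eq_add_one]
  have h2 : ∀ k : Nat, (a :: b :: rest).getD (2 * (k + 1)) 0 = rest.getD (2 * k) 0 := by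
    intro k
    have he : 2 * (k + 1) = 2 * k + 2 := by ring
    simp [he, List.getD]
  have h3 : ∀ k : Nat, (a :: b :: rest).getD (2 * (k + 1) + 1) 0 = rest.getD (2 * k + 1) 0 := by
    intro k
    have he : 2 * (k + 1) + 1 = (2 * k + 1) + 2 := by ring
    simp [he, List.getD]
  simp only [h2, h3]
  simp [List.getD]

theorem range_all_eq_pvPairs :
    ∀ (ov : List Int),
      ((List.range (ov.length / 2)).all
        (fun k => ov.getD (2 * k) 0 == ov.getD (2 * k + 1) 0)) = pvPairs ov := by
  intro ov
  induction ov using pvPairs.induct with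
  | case1 b rest ih =>
    rw [range_all_shift, ih]
    simp [pvPairs]
  | case2 a b rest hab =>
    rw [range_all_shift]
    simp [pvPairs, hab]
  | case3 t h =>
    match t, h with
    | [], _ => simp [pvPairs]
    | [a], _ => simp [pvPairs]
    | a :: b :: rest, h => exact absurd rfl (h a b rest)

theorem pyRange_even (n : Nat) :
    PySem.List.pyRange 0 ((n : Int) - 1) 2
      = (List.range (n / 2)).map (fun k => ((2 * k : Nat) : Int)) := by
  rw [PySem.List.pyRange_of_pos 0 ((n : Int) - 1) (by norm_num : (0:Int) < 2)]
  have hcount : (if (0:Int) < (n:Int) - 1 then (((n:Int) - 1 - 0 + 2 - 1) / 2).toNat else 0) = n / 2 := by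
    split
    · omega
    · omega
  rw [hcount]
  apply List.map_congr_left
  intro k _
  push_cast
  ring

theorem check_alt_eq_pvPairs (sh1 : List Int) (lim : Int) :
    check_alt sh1 lim = pvPairs (sh1.filter (fun s => decide (lim < s))) := by
  show ((PySem.List.pyRange 0 (((sh1.filter (fun s => decide (lim < s))).length : Int) - 1) 2).all
      (fun i => PySem.List.pyGetD (sh1.filter (fun s => decide (lim < s))) i 0
             == PySem.List.pyGetD (sh1.filter (fun s => decide (lim < s))) (i + 1) 0)) = _
  set ov := sh1.filter (fun s => decide (lim < s)) with hover
  rw [pyRange_even ov.length, List.all_map]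
  have e1 : ∀ k : Nat, PySem.List.pyGetD ov ((2 * k : Nat) : Int) 0 = ov.getD (2 * k) 0 := by
    intro k; exact PySem.List.pyGetD_natCast ov (2 * k) 0
  have e2 : ∀ k : Nat, PySem.List.pyGetD ov (((2 * k : Nat) : Int) + 1) 0 = ov.getD (2 * k + 1) 0 := by
    intro k
    have he : (((2 * k : Nat) : Int) + 1) = ((2 * k + 1 : Nat) : Int) := by push_cast; ring
    rw [he]
    exact PySem.List.pyGetD_natCast ov (2 * k + 1) 0
  simp only [Function.comp_def, e1, e2]
  exact range_all_eq_pvPairs ov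

-- ===== VERDICT (by name: the statement is the Claim_ definition above) =====
theorem check_spec : Claim_equal_check := by
  intro sh1 lim _
  unfold Spec_check check
  rw [check_alt_eq_pvPairs, checkGo_eq_pvPairs]
  simp
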